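-- pv_equiv track=rewrite | github.com/mieumje/Python_Coding_Test | Level2_Programmers/멀쩡한 사각형.py | solution
-- ===== SOURCE A (Python) =====
-- def solution(w,h):
--     answer = 1
--     M = max(w,h)
--     GCD = 0                             # w, h의 최대 공약수를 구함
--     for i in range(1, M+1):
--         if(w % i == 0 and h % i == 0):
--             GCD = i                       # w, h의 최대공약수
--
--     if(w == 0 or h == 0):               # w, h의 길이가 1cm인 경우 정답 = 0
--         return 0
--     if(w == h):                         # w, h의 길이가 같은 정사각형의 경우
--         return (w * h) - w              # w * h 에서 w만큼 제거
--
--     # 그 외의 경우 >> w * h를 최대 공약수 만큼 줄임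
--     W = w // GCD                        # w / 최대 공약수
--     H = h // GCD                        # h / 최대 공약수
--
--     answer = w * h - (GCD * ((W - 1) + H))
--     return answer
-- ===== SOURCE B (Python) =====
-- def solution(w, h):
--     # per-column scan: count squares the diagonal crosses in each column, subtract from w*h
--     broken = 0
--     for x in range(w):
--         lo = (h * x) // w                  # floor of left edge height
--         hi = -((-(h * (x + 1))) // w)      # ceil of right edge height
--         broken += hi - lo
--     return w * h - broken
-- ===== Notes on version B (the rewrite author's own statement) =====
-- stated objective: alternative
-- what changed: B replaces A's trial-division gcd loop plus closed-form formula by a per-column scan that counts, with exact integer floor/ceil division, how many unit squares the diagonal crosses in each column and subtracts the accumulated count from w*h.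
-- outside the precondition, e.g. on solution(-5, 3): A returns -12, B returns -15; on solution(-3, -3): A returns 12, B returns 9; on solution(-4, -2): A raises ZeroDivisionError, B returns 8
import Mathlib
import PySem

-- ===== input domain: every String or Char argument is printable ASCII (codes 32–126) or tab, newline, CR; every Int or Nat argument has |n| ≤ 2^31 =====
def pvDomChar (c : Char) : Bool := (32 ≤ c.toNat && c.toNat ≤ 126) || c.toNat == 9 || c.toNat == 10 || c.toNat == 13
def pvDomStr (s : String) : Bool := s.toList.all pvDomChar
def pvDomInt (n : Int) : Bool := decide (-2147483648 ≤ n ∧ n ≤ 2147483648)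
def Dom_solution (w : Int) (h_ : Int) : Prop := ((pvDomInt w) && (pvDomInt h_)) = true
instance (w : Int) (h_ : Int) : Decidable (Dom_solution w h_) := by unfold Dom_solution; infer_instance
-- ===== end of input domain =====

-- B replaces A's trial-division gcd loop + closed formula by a per-column scan counting
-- diagonal-crossed unit squares with exact integer floor/ceil division (objective: alternative).

-- ===== PORT A =====
def solution (w : Int) (h_ : Int) : Int :=
  let M := max w h_
  let GCD := (PySem.List.pyRange 1 (M + 1) 1).foldl
    (fun g i => if PySem.Int.mod w i = 0 ∧ PySem.Int.mod h_ i = 0 then i else g) 0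
  if w = 0 ∨ h_ = 0 then 0
  else if w = h_ then (w * h_) - w
  else
    let W := PySem.Int.floordiv w GCD
    let H := PySem.Int.floordiv h_ GCD
    w * h_ - (GCD * ((W - 1) + H))

-- ===== PORT B =====
def solution_alt (w : Int) (h_ : Int) : Int :=
  let broken := (PySem.List.pyRange 0 w 1).foldl
    (fun b x =>
      let lo := PySem.Int.floordiv (h_ * x) w
      let hi := -(PySem.Int.floordiv (-(h_ * (x + 1))) w)
      b + (hi - lo)) 0
  w * h_ - broken

-- ===== PRECONDITION & SPEC =====
-- Pre_ restricts to w ≥ 0, the natural domain of a width: for negative w A either raises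
-- ZeroDivisionError (h_ < 0 and w ≠ h_) or returns accidental values of Python's
-- floor-division sign convention, while B's column loop is empty there.
def Pre_solution (w : Int) (h_ : Int) : Prop := 0 ≤ w
instance (w : Int) (h_ : Int) : Decidable (Pre_solution w h_) := by unfold Pre_solution; infer_instance
def pvWitness_solution : Int × Int := (4, 6)
def Spec_solution (w : Int) (h_ : Int) (out : Int) : Prop := out = solution_alt w h_
instance (w : Int) (h_ : Int) (out : Int) : Decidable (Spec_solution w h_ out) := by unfold Spec_solution; infer_instance

-- ===== CLAIM (what is proved, stated in full; the proofs are below) =====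
def Claim_equal_solution : Prop := ∀ (w : Int) (h_ : Int), Dom_solution w h_ → Pre_solution w h_ → Spec_solution w h_ (solution w h_)

-- ===== LEMMAS AND PROOFS =====

-- exactness of floor division on a multiple
theorem pv_floordiv_exact (a w : Int) (hw : 0 < w) (hd : w ∣ a) :
    w * PySem.Int.floordiv a w = a := by
  rw [PySem.Int.floordiv_eq_ediv_of_pos hw]
  exact Int.mul_ediv_cancel' hd

-- ceiling division -((-a)//w) in terms of floor division
theorem pv_ceil_floordiv (a w : Int) (hw : 0 < w) :
    -(PySem.Int.floordiv (-a) w) = PySem.Int.floordiv a w + (if w ∣ a then 0 else 1) := by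
  rw [PySem.Int.floordiv_eq_ediv_of_pos hw, PySem.Int.floordiv_eq_ediv_of_pos hw]
  by_cases hd : w ∣ a
  · simp [hd, Int.neg_ediv_of_dvd hd]
  · simp only [hd, if_false]
    have h1 := Int.emod_add_mul_ediv a w
    have h2 := Int.emod_add_mul_ediv (-a) w
    have b1 := Int.emod_nonneg a (ne_of_gt hw)
    have b2 := Int.emod_lt_of_pos a hw
    have b3 := Int.emod_nonneg (-a) (ne_of_gt hw)
    have b4 := Int.emod_lt_of_pos (-a) hw
    have r1 : a % w ≠ 0 := fun h => hd (Int.dvd_of_emod_eq_zero h)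
    have r2 : (-a) % w ≠ 0 := by
      intro h
      exact hd ((dvd_neg).mp (Int.dvd_of_emod_eq_zero h))
    set q := a / w with hq
    set q2 := (-a) / w with hq2
    have key : w * (q + q2) = -(a % w + (-a) % w) := by ring_nf; linarith
    have lo : w * (-2) < w * (q + q2) := by omega
    have hi : w * (q + q2) < w * 0 := by omega
    have lo' : (-2 : Int) < q + q2 := lt_of_mul_lt_mul_left lo (le_of_lt hw)
    have hi' : q + q2 < 0 := lt_of_mul_lt_mul_left hi (le_of_lt hw)
    omega

-- count of k in [1,w] with w ∣ h*k is gcd(w,h)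
theorem pv_count (w h : Int) (hw : 0 < w) :
    ∑ k ∈ Finset.range w.toNat, (if w ∣ h * ((k : Int) + 1) then (1 : Int) else 0)
      = (Int.gcd w h : Int) := by
  set G : Int := (Int.gcd w h : Int) with hG
  have hGnat : 0 < Int.gcd w h := by
    have hne : w ≠ 0 := ne_of_gt hw
    exact Nat.pos_of_ne_zero (fun hz => hne (Int.eq_zero_of_gcd_eq_zero_left hz))
  have hGpos : 0 < G := by rw [hG]; exact_mod_cast hGnat
  have hGw : G ∣ w := Int.gcd_dvd_left w h
  have hGh : G ∣ h := Int.gcd_dvd_right w h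
  set w' : Int := w / G with hw'
  set h' : Int := h / G with hh'
  have hww' : G * w' = w := Int.mul_ediv_cancel' hGw
  have hhh' : G * h' = h := Int.mul_ediv_cancel' hGh
  have hw'pos : 0 < w' := by
    rcases lt_trichotomy w' 0 with h1 | h1 | h1
    · nlinarith
    · rw [h1] at hww'; omega
    · exact h1
  have hcop : Int.gcd w' h' = 1 := Int.gcd_div_gcd_div_gcd hGnat
  have hiff : ∀ m : Int, w ∣ h * m ↔ w' ∣ m := by
    intro m
    constructor
    · intro hd
      rw [← hww', ← hhh'] at hd
      have : w' ∣ h' * m := by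
        rcases hd with ⟨c, hc⟩
        exact ⟨c, by
          have : G * (h' * m) = G * (w' * c) := by rw [← mul_assoc, hc]; ring
          exact mul_left_cancel₀ (ne_of_gt hGpos) this⟩
      exact Int.dvd_of_dvd_mul_left_of_gcd_one (by rwa [mul_comm] at this) hcop
    · intro hd
      rw [← hww', ← hhh']
      rcases hd with ⟨c, hc⟩
      exact ⟨h' * c, by rw [hc]; ring⟩
  have hrw : ∀ k ∈ Finset.range w.toNat,
      (if w ∣ h * ((k : Int) + 1) then (1 : Int) else 0)
        = (if (w'.toNat) ∣ (k + 1) then (1 : Int) else 0) := by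
    intro k _
    have hcast : ((w'.toNat : Int)) = w' := Int.toNat_of_nonneg (le_of_lt hw'pos)
    have : w ∣ h * ((k : Int) + 1) ↔ (w'.toNat) ∣ (k + 1) := by
      rw [hiff, ← hcast]
      constructor
      · intro hd
        exact_mod_cast (Int.natCast_dvd_natCast (m := w'.toNat) (n := k + 1)).symm.mp
          (by exact_mod_cast hd)
      · intro hd
        have := (Int.natCast_dvd_natCast (m := w'.toNat) (n := k + 1)).mpr hd
        push_cast at this
        exact_mod_cast this
    simp [this]
  rw [Finset.sum_congr rfl hrw]
  set d := w'.toNat with hd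
  set n := w.toNat with hn
  have step1 : ∑ k ∈ Finset.range n, (if d ∣ (k + 1) then (1 : Int) else 0)
      = ∑ m ∈ Finset.Ico 1 (n + 1), (if d ∣ m then (1 : Int) else 0) := by
    rw [Finset.sum_Ico_eq_sum_range]
    simp [Nat.add_comm]
  have step2 : Finset.Ico 1 (n + 1) = Finset.Ioc 0 n := Finset.val_inj.mp rfl
  rw [step1, step2]
  have step3 : ∑ m ∈ Finset.Ioc 0 n, (if d ∣ m then (1 : Int) else 0)
      = (((Finset.Ioc 0 n).filter (d ∣ ·)).card : Int) := by
    simp [Finset.sum_boole]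
  rw [step3, Nat.Ioc_filter_dvd_card_eq_div]
  have hnd : n = Int.gcd w h * d := by
    have : w = G * w' := hww'.symm
    have h2 : w.toNat = G.toNat * w'.toNat := by
      rw [this, Int.toNat_mul (le_of_lt hGpos) (le_of_lt hw'pos)]
    simpa [hG, Int.toNat_natCast] using h2
  have hdpos : 0 < d := by
    simp [hd]; omega
  rw [hnd, Nat.mul_div_cancel _ hdpos]

-- the list-sum / Finset-sum bridge (definitional)
theorem pv_sum_range (f : Nat → Int) (n : Nat) :
    ((List.range n).map (fun k => f k)).sum = ∑ k ∈ Finset.range n, f k := rfl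

-- closed form of B for positive width
theorem pv_alt_formula (w h : Int) (hw : 0 < w) :
    solution_alt w h = w * h - (w + h - (Int.gcd w h : Int)) := by
  simp only [solution_alt]
  rw [PySem.List.foldl_add (PySem.List.pyRange 0 w 1)
      (fun x => -(PySem.Int.floordiv (-(h * (x + 1))) w) - PySem.Int.floordiv (h * x) w) 0]
  have hr : PySem.List.pyRange 0 w 1 = (List.range w.toNat).map (fun k : Nat => (k : Int)) := by
    simp [PySem.List.pyRange_one 0 w]
  rw [hr, List.map_map]
  have hbridge : ((List.range w.toNat).map
      ((fun x => -(PySem.Int.floordiv (-(h * (x + 1))) w) - PySem.Int.floordiv (h * x) w) ∘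
        (fun k : Nat => (k : Int)))).sum
      = ∑ k ∈ Finset.range w.toNat,
          (-(PySem.Int.floordiv (-(h * ((k : Int) + 1))) w) - PySem.Int.floordiv (h * (k : Int)) w) :=
    pv_sum_range _ _
  rw [hbridge]
  have hterm : ∀ k ∈ Finset.range w.toNat,
      (-(PySem.Int.floordiv (-(h * ((k : Int) + 1))) w) - PySem.Int.floordiv (h * (k : Int)) w)
      = (PySem.Int.floordiv (h * (((k + 1 : Nat) : Int))) w - PySem.Int.floordiv (h * ((k : Nat) : Int)) w)
        + (1 - (if w ∣ h * ((k : Int) + 1) then (1 : Int) else 0)) := by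
    intro k _
    rw [pv_ceil_floordiv (h * ((k : Int) + 1)) w hw]
    by_cases hd : w ∣ h * ((k : Int) + 1)
    · simp [hd]
    · simp [hd]; ring
  rw [Finset.sum_congr rfl hterm, Finset.sum_add_distrib,
      Finset.sum_range_sub (fun m : Nat => PySem.Int.floordiv (h * ((m : Nat) : Int)) w)]
  rw [Finset.sum_sub_distrib, Finset.sum_const, Finset.card_range, pv_count w h hw]
  have hcast : ((w.toNat : Nat) : Int) = w := Int.toNat_of_nonneg (le_of_lt hw)
  rw [hcast]
  have hF0 : PySem.Int.floordiv (h * ((0 : Nat) : Int)) w = 0 := by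
    rw [PySem.Int.floordiv_eq_ediv_of_pos hw]; simp
  have hFn : PySem.Int.floordiv (h * w) w = h := by
    rw [PySem.Int.floordiv_eq_ediv_of_pos hw]
    exact Int.mul_ediv_cancel h (ne_of_gt hw)
  rw [hF0, hFn]
  simp only [nsmul_eq_mul, mul_one, hcast]
  ring

-- A's gcd loop computes gcd(w, h)
theorem pv_gcd_loop (w h : Int) (hw : 0 < w) (n : Int) (hn : (Int.gcd w h : Int) ≤ n) :
    (PySem.List.pyRange 1 (n + 1) 1).foldl
      (fun g i => if PySem.Int.mod w i = 0 ∧ PySem.Int.mod h i = 0 then i else g) 0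
      = (Int.gcd w h : Int) := by
  set G : Int := (Int.gcd w h : Int) with hG
  have hGw : G ∣ w := Int.gcd_dvd_left w h
  have hGh : G ∣ h := Int.gcd_dvd_right w h
  have hG1 : 1 ≤ G := by
    have hne : w ≠ 0 := ne_of_gt hw
    have : 0 < Int.gcd w h := Nat.pos_of_ne_zero (fun hz => hne (Int.eq_zero_of_gcd_eq_zero_left hz))
    rw [hG]; exact_mod_cast this
  induction n, hn using Int.le_induction with
  | base =>
    rw [PySem.List.pyRange_one_succ_right hG1, List.foldl_append]
    simp [PySem.Int.mod_eq_zero_iff_dvd, hGw, hGh]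
  | succ n hn ih =>
    rw [PySem.List.pyRange_one_succ_right (by omega : (1:Int) ≤ n + 1), List.foldl_append, ih]
    simp only [List.foldl_cons, List.foldl_nil]
    rw [if_neg]
    rintro ⟨h1, h2⟩
    rw [PySem.Int.mod_eq_zero_iff_dvd] at h1 h2
    have hdG : (n + 1) ∣ (Int.gcd w h : Int) := Int.dvd_coe_gcd h1 h2
    have := Int.le_of_dvd (by omega) hdG
    omega

-- closed form of A for positive width
theorem pv_a_formula (w h : Int) (hw : 0 < w) :
    solution w h = w * h - (w + h - (Int.gcd w h : Int)) := by
  have hGw : (Int.gcd w h : Int) ∣ w := Int.gcd_dvd_left w h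
  have hGh : (Int.gcd w h : Int) ∣ h := Int.gcd_dvd_right w h
  have hGpos : (0 : Int) < (Int.gcd w h : Int) := by
    have hne : w ≠ 0 := ne_of_gt hw
    have : 0 < Int.gcd w h := Nat.pos_of_ne_zero (fun hz => hne (Int.eq_zero_of_gcd_eq_zero_left hz))
    exact_mod_cast this
  have hmax : (Int.gcd w h : Int) ≤ max w h := le_trans (Int.le_of_dvd hw hGw) (le_max_left w h)
  simp only [solution]
  rw [pv_gcd_loop w h hw (max w h) hmax]
  split_ifs with h1 h2
  · rcases h1 with h1 | h1
    · omega
    · subst h1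
      simp [abs_of_pos hw]
  · subst h2
    simp [Int.gcd_self, abs_of_pos hw]
  · have e1 := pv_floordiv_exact w (Int.gcd w h : Int) hGpos hGw
    have e2 := pv_floordiv_exact h (Int.gcd w h : Int) hGpos hGh
    have : (Int.gcd w h : Int) * ((PySem.Int.floordiv w (Int.gcd w h : Int) - 1)
        + PySem.Int.floordiv h (Int.gcd w h : Int))
        = (Int.gcd w h : Int) * PySem.Int.floordiv w (Int.gcd w h : Int)
          + (Int.gcd w h : Int) * PySem.Int.floordiv h (Int.gcd w h : Int)
          - (Int.gcd w h : Int) := by ring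
    rw [this, e1, e2]

-- ===== VERDICT (by name: the statement is the Claim_ definition above) =====
theorem solution_spec : Claim_equal_solution := by
  intro w h_ _ hpre
  unfold Spec_solution
  rcases lt_or_eq_of_le hpre with hw | hw
  · rw [pv_a_formula w h_ hw, pv_alt_formula w h_ hw]
  · subst hw
    simp [solution, solution_alt, PySem.List.pyRange_one_eq_nil (le_refl (0 : Int))]
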